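-- pv_equiv track=rewrite | github.com/zealits/ResumeParser | services/vectoriser.py | count_projects
-- ===== SOURCE A (Python) =====
-- def count_projects(projects_text: str) -> int:
--     """Count number of projects from projects text"""
--     if not projects_text:
--         return 0
--
--     # Count project entries (lines starting with "-" after KEY PROJECTS)
--     lines = projects_text.split('\n')
--     count = 0
--     in_projects_section = False
--
--     for line in lines:
--         if "KEY PROJECTS:" in line:
--             in_projects_section = True
--             continue
--         if in_projects_section and line.strip().startswith('-'):
--             count += 1
--
--     return count
-- ===== SOURCE B (Python) =====
-- def count_projects(projects_text: str) -> int: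
--     """Count number of projects from projects text"""
--     lines = projects_text.split('\n')
--     start = next((i for i, line in enumerate(lines) if "KEY PROJECTS:" in line), None)
--     if start is None:
--         return 0
--     return sum(1 for line in lines[start + 1:]
--                if "KEY PROJECTS:" not in line and line.strip().startswith('-'))
-- ===== Notes on version B (the rewrite author's own statement) =====
-- stated objective: simpler
-- what changed: Replaced the flag-driven single-pass state machine (and the empty-string guard) by locate-the-first-header-then-count: find the index of the first line containing 'KEY PROJECTS:', return 0 if absent, else a filtered count over the tail slice.
import Mathlib
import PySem

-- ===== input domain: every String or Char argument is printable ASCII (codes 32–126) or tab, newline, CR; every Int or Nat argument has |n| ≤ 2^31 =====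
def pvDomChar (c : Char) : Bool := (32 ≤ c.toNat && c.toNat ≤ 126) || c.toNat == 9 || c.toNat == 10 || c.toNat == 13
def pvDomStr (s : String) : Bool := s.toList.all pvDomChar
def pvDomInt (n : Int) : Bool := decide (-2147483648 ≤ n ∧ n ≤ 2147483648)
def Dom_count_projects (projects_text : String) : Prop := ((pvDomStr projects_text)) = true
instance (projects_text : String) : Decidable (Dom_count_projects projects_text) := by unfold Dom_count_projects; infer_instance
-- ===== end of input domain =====

-- B replaces A's flag-driven state machine by locate-first-header-then-filtered-count over the tail (objective: simpler).
-- Lines are handled as List Char via PySem.Chars (exact on the ASCII domain).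

def cpHeader : List Char := "KEY PROJECTS:".toList

-- ===== PORT A =====
-- A's loop body: header line sets the flag and skips; else count a '-' line when the flag is set
def cpStep (st : Int × Bool) (line : List Char) : Int × Bool :=
  if PySem.Chars.isIn cpHeader line then (st.1, true)
  else if st.2 && PySem.Chars.startswith (PySem.Chars.strip line) ['-'] then (st.1 + 1, st.2)
  else st

def count_projects (projects_text : String) : Int :=
  if projects_text == "" then 0
  else
    let lines := PySem.Chars.splitOn projects_text.toList ['\n']
    (lines.foldl cpStep (0, false)).1

-- ===== PORT B =====
-- Source B's tail filter: not a header line, and strip().startswith('-')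
def cpPred (line : List Char) : Bool :=
  !PySem.Chars.isIn cpHeader line && PySem.Chars.startswith (PySem.Chars.strip line) ['-']

-- index of the first line containing the header (the `next(… enumerate …)` in Source B)
def cpFindHeader : List (List Char) → Option Nat
  | [] => none
  | l :: ls =>
    if PySem.Chars.isIn cpHeader l then some 0
    else (cpFindHeader ls).map (· + 1)

def count_projects_alt (projects_text : String) : Int :=
  let lines := PySem.Chars.splitOn projects_text.toList ['\n']
  match cpFindHeader lines with
  | none => 0
  | some start => ((lines.drop (start + 1)).countP cpPred : Int)

-- ===== PRECONDITION & SPEC =====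
def Spec_count_projects (projects_text : String) (out : Int) : Prop := out = count_projects_alt projects_text
instance (projects_text : String) (out : Int) : Decidable (Spec_count_projects projects_text out) := by unfold Spec_count_projects; infer_instance

-- ===== CLAIM (what is proved, stated in full; the proofs are below) =====
def Claim_equal_count_projects : Prop := ∀ (projects_text : String), Dom_count_projects projects_text → Spec_count_projects projects_text (count_projects projects_text)

-- ===== LEMMAS AND PROOFS =====

-- once the flag is true, the fold counts exactly the cpPred lines
lemma cp_fold_true (lines : List (List Char)) (c : Int) :
    (lines.foldl cpStep (c, true)).1 = c + (lines.countP cpPred : Int) := by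
  induction lines generalizing c with
  | nil => simp
  | cons l ls ih =>
    rw [List.foldl_cons]
    by_cases h : PySem.Chars.isIn cpHeader l = true
    · rw [show cpStep (c, true) l = (c, true) from by simp [cpStep, h], ih]
      simp [cpPred, h]
    · by_cases h2 : PySem.Chars.startswith (PySem.Chars.strip l) ['-'] = true
      · rw [show cpStep (c, true) l = (c + 1, true) from by simp [cpStep, h, h2], ih]
        simp [cpPred, h, h2]; omega
      · rw [show cpStep (c, true) l = (c, true) from by simp [cpStep, h, h2], ih]
        simp [cpPred, h, h2]

-- with the flag still false, the fold computes B's locate-then-count value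
lemma cp_fold_false (lines : List (List Char)) (c : Int) :
    (lines.foldl cpStep (c, false)).1 =
      c + (match cpFindHeader lines with
           | none => (0 : Int)
           | some i => ((lines.drop (i + 1)).countP cpPred : Int)) := by
  induction lines generalizing c with
  | nil => simp [cpFindHeader]
  | cons l ls ih =>
    rw [List.foldl_cons]
    by_cases h : PySem.Chars.isIn cpHeader l = true
    · rw [show cpStep (c, false) l = (c, true) from by simp [cpStep, h], cp_fold_true]
      simp [cpFindHeader, h]
    · rw [show cpStep (c, false) l = (c, false) from by simp [cpStep, h], ih]
      simp only [cpFindHeader, h, Bool.false_eq_true, if_false]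
      cases hf : cpFindHeader ls <;> simp

-- ===== VERDICT (by name: the statement is the Claim_ definition above) =====
theorem count_projects_spec : Claim_equal_count_projects := by
  intro s _
  unfold Spec_count_projects count_projects count_projects_alt
  by_cases he : s == ""
  · have hs : s = "" := beq_iff_eq.mp he
    subst hs
    decide
  · simp only [he, Bool.false_eq_true, if_false]
    rw [cp_fold_false]
    cases hf : cpFindHeader (PySem.Chars.splitOn s.toList ['\n']) <;> simp
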